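-- pv_equiv track=rewrite | github.com/karen-alber11/property_sale_app | Fall 22/Machine Learning/FaceAndDigitClassification/FaceAndDigitClassification/Environmental_Variables.py | Loop
-- ===== SOURCE A (Python) =====
-- def Loop(mtrx, img_no):
--     image = mtrx[img_no]
--     lines = []
--     topLines = 0
--     spaces = 0
--     for line in image:
--         begin = False
--         end = False
--         count = 0
--         topLines = 0
--         spaces = 0
--         for char in line:
--             if(char == "+" or char == "#"):
--                 if(spaces > 0):
--                     topLines = 0
--                     spaces = 0
--                 topLines += 1
--                 if(not begin):
--                     begin = True
--                 else:
--                     if(not end and count > 1):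
--                         end = True
--                         break
--             elif(begin and char == " "):
--                 count += 1
--                 spaces += 1
--
--         if(topLines > 6):
--             lines.append(-1)
--         elif(not end):
--             lines.append(0)
--             count = 0
--         else:
--             lines.append(1)
--     countLoop = 0
--     topLine = False
--     bottomLine = False
--     emptySpace = False
--     for num in lines:
--         if(num == -1 and topLine == False):
--             topLine = True
--         elif(num == 1):
--             emptySpace = True
--         elif(num == -1 and topLine == True and emptySpace == True):
--             bottomLine = True
--         elif(num == 0):
--             topLine = False
--             emptySpace = False
--             bottomLine = False
--         if(topLine and emptySpace and bottomLine):
--             topLine = False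
--             emptySpace = False
--             bottomLine = False
--             countLoop += 1
--     return countLoop
-- ===== SOURCE B (Python) =====
-- def _label(line):
--     # keep only filled ("+"/"#") and blank (" ") cells, as a list of booleans (True = filled)
--     seq = [c != " " for c in line if c in ("+", "#", " ")]
--     # strip blanks before the first filled cell and after the last one
--     while seq and not seq[0]:
--         seq = seq[1:]
--     while seq and not seq[-1]:
--         seq = seq[:-1]
--     if not seq:
--         return 0
--     if seq.count(False) >= 2:
--         return 1
--     run = 0
--     for x in reversed(seq):
--         if x:
--             run += 1
--         else:
--             break
--     return -1 if run > 6 else 0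
--
--
-- def Loop(mtrx, img_no):
--     countLoop = 0
--     topLine = emptySpace = bottomLine = False
--     for line in mtrx[img_no]:
--         num = _label(line)
--         if num == -1 and not topLine:
--             topLine = True
--         elif num == 1:
--             emptySpace = True
--         elif num == -1 and topLine and emptySpace:
--             bottomLine = True
--         elif num == 0:
--             topLine = emptySpace = bottomLine = False
--         if topLine and emptySpace and bottomLine:
--             topLine = emptySpace = bottomLine = False
--             countLoop += 1
--     return countLoop
-- ===== Notes on version B (the rewrite author's own statement) =====
-- stated objective: alternative
-- what changed: B fuses A's build-a-list-then-scan phases into one streaming pass over the image, and replaces A's stateful five-variable character scan per line by a closed-form computation: filter the line to filled/blank cells, strip leading/trailing blanks, then classify by the blank count of the stripped core and the length of its trailing filled run.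
import Mathlib
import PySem

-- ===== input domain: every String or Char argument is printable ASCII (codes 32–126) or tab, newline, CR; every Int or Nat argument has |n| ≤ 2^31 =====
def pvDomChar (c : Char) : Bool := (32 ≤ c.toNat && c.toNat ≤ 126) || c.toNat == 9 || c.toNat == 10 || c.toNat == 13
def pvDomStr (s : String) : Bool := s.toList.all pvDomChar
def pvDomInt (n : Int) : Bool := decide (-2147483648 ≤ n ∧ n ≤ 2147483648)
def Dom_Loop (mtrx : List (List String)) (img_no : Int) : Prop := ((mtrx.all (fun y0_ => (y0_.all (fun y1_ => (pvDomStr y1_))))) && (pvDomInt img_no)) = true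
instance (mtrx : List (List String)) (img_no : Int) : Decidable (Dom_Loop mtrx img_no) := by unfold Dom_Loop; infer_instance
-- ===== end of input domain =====

-- B fuses A's two phases into one streaming pass and replaces A's stateful
-- five-variable character scan by a filter/strip/count closed form per line;
-- return values are proved equal on all in-range indices (objective: alternative).

-- ===== PORT A =====
-- inner 'for char in line' loop of A; returns (end, topLines); break = early return
def pvInnerA : List Char → Bool → Bool → Int → Int → Int → Bool × Int
  | [], _, end_, _, topLines, _ => (end_, topLines)
  | c :: rest, begin_, end_, count, topLines, spaces =>
    if c == '+' || c == '#' then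
      let topLines := if spaces > 0 then 0 else topLines
      let spaces := if spaces > 0 then 0 else spaces
      let topLines := topLines + 1
      if !begin_ then pvInnerA rest true end_ count topLines spaces
      else if !end_ && count > 1 then (true, topLines)   -- end = True; break
      else pvInnerA rest begin_ end_ count topLines spaces
    else if begin_ && c == ' ' then pvInnerA rest begin_ end_ (count + 1) topLines (spaces + 1)
    else pvInnerA rest begin_ end_ count topLines spaces

-- the per-line classification appended to 'lines'
def pvLineA (line : String) : Int :=
  let r := pvInnerA line.toList false false 0 0 0
  if r.2 > 6 then -1 else if !r.1 then 0 else 1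

-- one step of A's second 'for num in lines' loop; state = (countLoop, topLine, emptySpace, bottomLine)
def pvStepA (st : Int × Bool × Bool × Bool) (num : Int) : Int × Bool × Bool × Bool :=
  let (c, tL, eS, bL) := st
  let (tL, eS, bL) :=
    if num == -1 && !tL then (true, eS, bL)
    else if num == 1 then (tL, true, bL)
    else if num == -1 && tL && eS then (tL, eS, true)
    else if num == 0 then (false, false, false)
    else (tL, eS, bL)
  if tL && eS && bL then (c + 1, false, false, false) else (c, tL, eS, bL)

def Loop (mtrx : List (List String)) (img_no : Int) : Int :=
  match PySem.List.pyGet? mtrx img_no with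
  | none => 0   -- IndexError in Python; excluded by Pre_Loop
  | some image =>
    let lines := image.foldl (fun acc line => acc ++ [pvLineA line]) ([] : List Int)
    (lines.foldl pvStepA (0, false, false, false)).1

-- ===== PORT B =====
-- filled/blank cells of a line as booleans (True = '+'/'#'), other characters dropped
def pvSeqB (line : String) : List Bool :=
  line.toList.filterMap (fun c =>
    if c == '+' || c == '#' then some true
    else if c == ' ' then some false else none)

def pvLabelB (line : String) : Int :=
  let s1 := (pvSeqB line).dropWhile (fun b => !b)            -- strip leading blanks
  let s2 := (s1.reverse.dropWhile (fun b => !b)).reverse     -- strip trailing blanks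
  if s2 = [] then 0
  else if 2 ≤ s2.count false then 1
  else
    let run := (s2.reverse.takeWhile (fun b => b)).length    -- 'for x in reversed(seq)' with break
    if (run : Int) > 6 then -1 else 0

-- B's state-machine transition, fed each freshly computed label
def pvStepB (st : Int × Bool × Bool × Bool) (num : Int) : Int × Bool × Bool × Bool :=
  let (c, tL, eS, bL) := st
  let (tL, eS, bL) :=
    if num == -1 && !tL then (true, eS, bL)
    else if num == 1 then (tL, true, bL)
    else if num == -1 && tL && eS then (tL, eS, true)
    else if num == 0 then (false, false, false)
    else (tL, eS, bL)
  if tL && eS && bL then (c + 1, false, false, false) else (c, tL, eS, bL)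

def Loop_alt (mtrx : List (List String)) (img_no : Int) : Int :=
  match PySem.List.pyGet? mtrx img_no with
  | none => 0   -- IndexError in Python; excluded by Pre_Loop
  | some image =>
    (image.foldl (fun st line => pvStepB st (pvLabelB line)) (0, false, false, false)).1

-- ===== PRECONDITION & SPEC =====
-- Python raises IndexError on mtrx[img_no] when the index is out of range; excluded here.
def Pre_Loop (mtrx : List (List String)) (img_no : Int) : Prop :=
  PySem.Raise.InRange mtrx.length img_no
instance (mtrx : List (List String)) (img_no : Int) : Decidable (Pre_Loop mtrx img_no) := by unfold Pre_Loop; infer_instance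

def pvWitness_Loop : List (List String) × Int := ([["###", "#  #", "###"]], 0)

def Spec_Loop (mtrx : List (List String)) (img_no : Int) (out : Int) : Prop := out = Loop_alt mtrx img_no
instance (mtrx : List (List String)) (img_no : Int) (out : Int) : Decidable (Spec_Loop mtrx img_no out) := by unfold Spec_Loop; infer_instance

-- ===== CLAIM (what is proved, stated in full; the proofs are below) =====
def Claim_equal_Loop : Prop := ∀ (mtrx : List (List String)) (img_no : Int), Dom_Loop mtrx img_no → Pre_Loop mtrx img_no → Spec_Loop mtrx img_no (Loop mtrx img_no)

-- ===== LEMMAS AND PROOFS =====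

-- A's inner loop factored through the filtered boolean sequence (end always false inside)
def pvF : List Bool → Bool → Int → Int → Int → Bool × Int
  | [], _, _, topLines, _ => (false, topLines)
  | true :: rest, begin_, count, topLines, spaces =>
      let topLines' := (if spaces > 0 then 0 else topLines) + 1
      let spaces' := if spaces > 0 then 0 else spaces
      if !begin_ then pvF rest true count topLines' spaces'
      else if count > 1 then (true, topLines')
      else pvF rest begin_ count topLines' spaces'
  | false :: rest, begin_, count, topLines, spaces =>
      if begin_ then pvF rest begin_ (count + 1) topLines (spaces + 1)
      else pvF rest begin_ count topLines spaces

-- whether A's inner loop breaks (end = True), over the boolean sequence, begin = true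
def pvHasEnd : List Bool → Int → Bool
  | [], _ => false
  | true :: rest, count => decide (count > 1) || pvHasEnd rest count
  | false :: rest, count => pvHasEnd rest (count + 1)

def pvLastRun (l : List Bool) : Nat :=
  ((l.reverse.dropWhile (fun b => !b)).takeWhile (fun b => b)).length

def pvCore (l : List Bool) : List Bool := (l.reverse.dropWhile (fun b => !b)).reverse

theorem pvInnerA_eq_pvF (line : List Char) :
    ∀ (b : Bool) (cnt t sp : Int),
    pvInnerA line b false cnt t sp =
      pvF (line.filterMap (fun c =>
        if c == '+' || c == '#' then some true
        else if c == ' ' then some false else none)) b cnt t sp := by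
  induction line with
  | nil => intro b cnt t sp; rfl
  | cons c rest ih =>
    intro b cnt t sp
    by_cases h1 : (c == '+' || c == '#') = true
    · simp only [pvInnerA, List.filterMap_cons, h1, if_pos, pvF]
      cases b <;> simp [ih]
    · by_cases h2 : (c == ' ') = true
      · simp only [pvInnerA, List.filterMap_cons, h1, h2]
        cases b <;> simp [pvF, ih]
      · simp only [pvInnerA, List.filterMap_cons, h1, h2]
        simp [ih]

theorem pvF_dropWhile (s : List Bool) (cnt t sp : Int) :
    pvF s false cnt t sp = pvF (s.dropWhile (fun b => !b)) false cnt t sp := by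
  induction s with
  | nil => rfl
  | cons x rest ih =>
    cases x
    · simpa [pvF, List.dropWhile] using ih
    · simp [List.dropWhile]

theorem takeWhile_id_append_false (v w : List Bool) :
    (v ++ false :: w).takeWhile (fun b => b) = v.takeWhile (fun b => b) := by
  induction v with
  | nil => simp [List.takeWhile]
  | cons x rest ih => cases x <;> simp [List.takeWhile, ih]

theorem dropWhile_rev_isEmpty_false (r : List Bool) (h : r.any id = true) :
    (r.reverse.dropWhile fun b => !b).isEmpty = false := by
  rw [List.isEmpty_eq_false_iff]
  intro hnil
  rcases List.any_eq_true.1 h with ⟨x, hx, hid⟩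
  have := List.dropWhile_eq_nil_iff.1 hnil x (by simpa using hx)
  simp at this hid
  simp [this] at hid

theorem pvLastRun_irrel (u r : List Bool) (h : r.any id = true) :
    pvLastRun (u ++ false :: r) = pvLastRun r := by
  unfold pvLastRun
  have hr := dropWhile_rev_isEmpty_false r h
  rw [List.reverse_append, List.reverse_cons, List.append_assoc, List.dropWhile_append, hr]
  simp only [if_false, Bool.false_eq_true, List.singleton_append]
  rw [takeWhile_id_append_false]

theorem pvLastRun_replicate (k : Nat) (r : List Bool) (h : r.any id = false) :
    pvLastRun (List.replicate k true ++ r) = k := by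
  unfold pvLastRun
  have hall : ∀ x ∈ r.reverse, (fun b => !b) x = true := by
    intro x hx
    have := List.any_eq_false.1 h x (by simpa using hx)
    simpa using this
  rw [List.reverse_append, List.dropWhile_append, List.dropWhile_eq_nil_iff.2 hall]
  simp [List.reverse_replicate]

-- main characterisation of A's inner loop after 'begin' has been set
theorem pvF_main (l : List Bool) :
    ∀ (cnt t sp : Int), (cnt ≤ 1 ∨ 0 < sp) → 0 ≤ t → 0 ≤ sp →
    pvF l true cnt t sp =
      (if pvHasEnd l cnt then (true, 1)
       else (false, if l.any id then ((pvLastRun ((if 0 < sp then [] else List.replicate t.toNat true) ++ l) : Nat) : Int) else t)) := by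
  induction l with
  | nil => intro cnt t sp _ _ _; simp [pvF, pvHasEnd]
  | cons x rest ih =>
    intro cnt t sp hinv ht hsp
    cases x
    · -- false :: rest
      have : pvF (false :: rest) true cnt t sp = pvF rest true (cnt + 1) t (sp + 1) := by
        simp [pvF]
      rw [this, ih (cnt + 1) t (sp + 1) (Or.inr (by omega)) ht (by omega)]
      have hsp1 : (0 : Int) < sp + 1 := by omega
      simp only [pvHasEnd, List.any_cons, id, Bool.false_or, if_pos hsp1, List.nil_append]
      split
      · rfl
      · by_cases ha : rest.any id = true
        · simp [ha, pvLastRun_irrel _ rest ha]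
        · simp [ha]
    · -- true :: rest
      by_cases hc : cnt > 1
      · have hsp0 : (0 : Int) < sp := by rcases hinv with h | h; omega; exact h
        have : pvF (true :: rest) true cnt t sp = (true, (0 : Int) + 1) := by
          simp [pvF, if_pos hsp0, hc]
        rw [this]
        have : pvHasEnd (true :: rest) cnt = true := by simp [pvHasEnd]; omega
        rw [this]; norm_num
      · -- no break at this cell
        have hstep : pvF (true :: rest) true cnt t sp
            = pvF rest true cnt ((if sp > 0 then 0 else t) + 1) (if sp > 0 then 0 else sp) := by
          simp [pvF, hc]
        set t' : Int := (if sp > 0 then 0 else t) + 1 with ht'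
        have hsp' : (if sp > 0 then (0:Int) else sp) = 0 := by split <;> omega
        have ht'pos : (1 : Int) ≤ t' := by rw [ht']; split <;> omega
        rw [hstep, hsp', ih cnt t' 0 (Or.inl (by omega)) (by omega) le_rfl]
        have hEnd : pvHasEnd (true :: rest) cnt = pvHasEnd rest cnt := by
          simp [pvHasEnd]; omega
        rw [hEnd]
        have hlist : List.replicate t'.toNat true ++ rest
            = (if 0 < sp then [] else List.replicate t.toNat true) ++ true :: rest := by
          by_cases hsp0 : (0 : Int) < sp
          · have h1 : t' = 1 := by rw [ht']; simp [hsp0]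
            simp [h1, hsp0]
          · have h1 : t'.toNat = t.toNat + 1 := by rw [ht']; simp [hsp0]; omega
            rw [h1, List.replicate_succ']
            simp [hsp0]
        split
        · rfl
        · by_cases ha : rest.any id = true
          · simp [ha, hlist]
          · have ha' : rest.any id = false := by simpa using ha
            have hrep := pvLastRun_replicate t'.toNat rest ha'
            simp [ha', ← hlist, hrep, Int.toNat_of_nonneg (by omega : (0:Int) ≤ t')]

-- core decomposition lemmas
theorem pvCore_cons_of_any (x : Bool) (r : List Bool) (h : r.any id = true) :
    pvCore (x :: r) = x :: pvCore r := by
  unfold pvCore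
  rw [List.reverse_cons, List.dropWhile_append, dropWhile_rev_isEmpty_false r h]
  simp

theorem pvCore_of_not_any (x : Bool) (r : List Bool) (h : r.any id = false) :
    pvCore (x :: r) = if x then [true] else [] := by
  unfold pvCore
  have hnil : (r.reverse.dropWhile fun b => !b) = [] := by
    apply List.dropWhile_eq_nil_iff.2
    intro y hy
    have := List.any_eq_false.1 h y (by simpa using hy)
    simpa using this
  rw [List.reverse_cons, List.dropWhile_append, hnil]
  cases x <;> simp [List.dropWhile]

theorem pvHasEnd_iff (l : List Bool) :
    ∀ cnt : Int, pvHasEnd l cnt = true ↔ (l.any id = true ∧ cnt + ((pvCore l).count false : Int) > 1) := by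
  induction l with
  | nil => intro cnt; simp [pvHasEnd]
  | cons x rest ih =>
    intro cnt
    by_cases ha : rest.any id = true
    · rw [pvCore_cons_of_any x rest ha]
      cases x
      · have h1 : pvHasEnd (false :: rest) cnt = pvHasEnd rest (cnt + 1) := rfl
        have hc : ((false :: pvCore rest).count false : Int) = ((pvCore rest).count false : Int) + 1 := by
          simp
        rw [h1, ih (cnt + 1), hc]
        simp only [List.any_cons, id, Bool.false_or, ha]
        constructor
        · rintro ⟨-, h2⟩; exact ⟨by simp, by omega⟩
        · rintro ⟨-, h2⟩; exact ⟨trivial, by omega⟩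
      · have h1 : pvHasEnd (true :: rest) cnt = (decide (cnt > 1) || pvHasEnd rest cnt) := rfl
        have hc : ((true :: pvCore rest).count false : Int) = ((pvCore rest).count false : Int) := by
          simp
        rw [h1, hc]
        simp only [Bool.or_eq_true, decide_eq_true_eq, ih cnt, List.any_cons, id, Bool.true_or, ha]
        have hnn : (0 : Int) ≤ ((pvCore rest).count false : Int) := by positivity
        constructor
        · rintro (hgt | ⟨-, h2⟩) <;> exact ⟨by simp, by omega⟩
        · rintro ⟨-, h2⟩
          by_cases hgt : cnt > 1
          · exact Or.inl hgt
          · exact Or.inr ⟨trivial, by omega⟩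
    · have ha' : rest.any id = false := by simpa using ha
      have hEfalse : ∀ c : Int, pvHasEnd rest c = false := by
        intro c
        by_contra hcon
        simp only [Bool.not_eq_false] at hcon
        exact ha ((ih c).1 hcon).1
      cases x
      · rw [pvCore_of_not_any false rest ha']
        have h1 : pvHasEnd (false :: rest) cnt = pvHasEnd rest (cnt + 1) := rfl
        simp [h1, hEfalse, ha']
      · rw [pvCore_of_not_any true rest ha']
        have h1 : pvHasEnd (true :: rest) cnt = (decide (cnt > 1) || pvHasEnd rest cnt) := rfl
        simp [h1, hEfalse]

theorem head_dropWhile_true (l : List Bool) :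
    ∀ b rest, l.dropWhile (fun b => !b) = b :: rest → b = true := by
  induction l with
  | nil => intro b rest h; simp [List.dropWhile] at h
  | cons x xs ih =>
    intro b rest h
    cases x
    · exact ih b rest (by simpa [List.dropWhile] using h)
    · simp [List.dropWhile] at h
      exact h.1

theorem pvLabel_eq (line : String) : pvLineA line = pvLabelB line := by
  have hB : pvLabelB line =
      (if pvCore ((pvSeqB line).dropWhile (fun b => !b)) = [] then 0
       else if 2 ≤ (pvCore ((pvSeqB line).dropWhile (fun b => !b))).count false then 1
       else if ((((pvCore ((pvSeqB line).dropWhile (fun b => !b))).reverse.takeWhile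
                    (fun b => b)).length : Nat) : Int) > 6 then -1 else 0) := rfl
  have hA : pvLineA line =
      (if (pvF ((pvSeqB line).dropWhile (fun b => !b)) false 0 0 0).2 > 6 then -1
       else if !(pvF ((pvSeqB line).dropWhile (fun b => !b)) false 0 0 0).1 then 0 else 1) := by
    unfold pvLineA
    rw [pvInnerA_eq_pvF]
    rw [show (line.toList.filterMap (fun c =>
        if c == '+' || c == '#' then some true
        else if c == ' ' then some false else none)) = pvSeqB line from rfl]
    rw [pvF_dropWhile]
  rw [hA, hB]
  cases hsp : (pvSeqB line).dropWhile (fun b => !b) with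
  | nil =>
    simp [pvF, pvCore]
  | cons b rest =>
    have hb : b = true := head_dropWhile_true _ b rest hsp
    subst hb
    have hstep : pvF (true :: rest) false 0 0 0 = pvF rest true 0 1 0 := by
      simp [pvF]
    rw [hstep, pvF_main rest 0 1 0 (Or.inl (by norm_num)) (by norm_num) le_rfl]
    have hpad : ((if (0:Int) < 0 then [] else List.replicate (1:Int).toNat true) : List Bool) = [true] := by
      norm_num
    rw [hpad]
    have hrun : (((pvCore (true :: rest)).reverse.takeWhile (fun b => b)).length : Nat)
        = pvLastRun (true :: rest) := by
      unfold pvCore pvLastRun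
      rw [List.reverse_reverse]
    by_cases hE : pvHasEnd rest 0 = true
    · -- A breaks out of the character loop: label 1; B sees ≥ 2 blanks inside the core
      rcases (pvHasEnd_iff rest 0).1 hE with ⟨ha, hcnt⟩
      have hne' : pvCore (true :: rest) ≠ [] := by
        rw [pvCore_cons_of_any true rest ha]; simp
      have hcc : (pvCore (true :: rest)).count false = (pvCore rest).count false := by
        rw [pvCore_cons_of_any true rest ha]; simp
      have hc2 : 2 ≤ (pvCore (true :: rest)).count false := by omega
      rw [if_pos hE, if_neg hne', if_pos hc2]
      norm_num
    · -- A's loop runs to the end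
      have hne : pvCore (true :: rest) ≠ [] := by
        by_cases ha : rest.any id = true
        · rw [pvCore_cons_of_any true rest ha]; simp
        · rw [pvCore_of_not_any true rest (by simpa using ha)]; simp
      have hclt : ¬ 2 ≤ (pvCore (true :: rest)).count false := by
        by_cases ha : rest.any id = true
        · rw [pvCore_cons_of_any true rest ha]
          intro hge
          simp at hge
          exact hE ((pvHasEnd_iff rest 0).2 ⟨ha, by omega⟩)
        · rw [pvCore_of_not_any true rest (by simpa using ha)]
          simp
      have hT : (if rest.any id = true then ((pvLastRun ([true] ++ rest) : Nat) : Int) else 1)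
          = ((pvLastRun (true :: rest) : Nat) : Int) := by
        rw [List.singleton_append]
        by_cases ha : rest.any id = true
        · rw [if_pos ha]
        · have ha' : rest.any id = false := by simpa using ha
          rw [if_neg ha]
          have h1 := pvLastRun_replicate 1 rest ha'
          simp [List.replicate] at h1
          rw [h1]
          norm_num
      rw [if_neg hE, if_neg hne, if_neg hclt, hrun, hT]
      by_cases h6 : ((pvLastRun (true :: rest) : Nat) : Int) > 6
      · simp [h6]
      · simp [h6]

theorem foldl_append_map_gen (f : String → Int) (image : List String) :
    ∀ acc : List Int, image.foldl (fun acc line => acc ++ [f line]) acc = acc ++ image.map f := by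
  induction image with
  | nil => intro acc; simp
  | cons x xs ih => intro acc; simp [List.foldl_cons, ih]

theorem foldl_append_map (f : String → Int) (image : List String) :
    image.foldl (fun acc line => acc ++ [f line]) [] = image.map f := by
  simpa using foldl_append_map_gen f image []

-- ===== VERDICT (by name: the statement is the Claim_ definition above) =====
theorem Loop_spec : Claim_equal_Loop := by
  intro mtrx img_no _ hpre
  unfold Spec_Loop Loop Loop_alt
  cases hget : PySem.List.pyGet? mtrx img_no with
  | none => rfl
  | some image =>
    simp only
    rw [foldl_append_map pvLineA image]
    rw [List.foldl_map]
    have : pvStepA = pvStepB := rfl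
    rw [this]
    simp only [pvLabel_eq]
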